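-- pv_equiv track=rewrite | github.com/vOzzT/EEL4334-Project1 | qm.py | group_minterms
-- ===== SOURCE A (Python) =====
-- import itertools
--
-- def expand_dont_cares(minterm):
--     """Expands a minterm with don't-care '-' into all possible binary combinations."""
--     positions = [i for i, char in enumerate(minterm) if char == '-']
--     combinations = []
--     for values in itertools.product("01", repeat=len(positions)):
--         expanded = list(minterm)
--         for pos, value in zip(positions, values):
--             expanded[pos] = value
--         combinations.append("".join(expanded))
--     return combinations
--
-- def group_minterms(minterms):
--     """Groups minterms based on the number of 1s."""
--     groups = {}
--     for minterm in minterms: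
--         expanded_terms = expand_dont_cares(minterm)
--         for expanded in expanded_terms:
--             count = expanded.count("1")
--             if count not in groups:
--                 groups[count] = []
--             groups[count].append(expanded)
--     return groups
-- ===== SOURCE B (Python) =====
-- def _expand(s, ones):
--     """All '-'-substitutions of s ('0' before '1', leftmost wildcard first),
--     each paired with its total count of 1s, threaded as an accumulator."""
--     if not s:
--         return [("", ones)]
--     c = s[0]
--     if c == '-':
--         return ([('0' + t, k) for t, k in _expand(s[1:], ones)]
--                 + [('1' + t, k) for t, k in _expand(s[1:], ones + 1)])
--     return [(c + t, k) for t, k in _expand(s[1:], ones + (1 if c == '1' else 0))]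
--
--
-- def group_minterms(minterms):
--     """Groups minterms based on the number of 1s."""
--     groups = {}
--     for minterm in minterms:
--         for expanded, count in _expand(minterm, 0):
--             groups.setdefault(count, []).append(expanded)
--     return groups
-- ===== Notes on version B (the rewrite author's own statement) =====
-- stated objective: alternative
-- what changed: Replaces itertools.product over the global list of dash positions plus a per-result position-by-position substitution and a separate .count('1') scan with a structural recursion over the string that substitutes the first character, threads the running count of 1s as an accumulator, and groups via setdefault.
import Mathlib
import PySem

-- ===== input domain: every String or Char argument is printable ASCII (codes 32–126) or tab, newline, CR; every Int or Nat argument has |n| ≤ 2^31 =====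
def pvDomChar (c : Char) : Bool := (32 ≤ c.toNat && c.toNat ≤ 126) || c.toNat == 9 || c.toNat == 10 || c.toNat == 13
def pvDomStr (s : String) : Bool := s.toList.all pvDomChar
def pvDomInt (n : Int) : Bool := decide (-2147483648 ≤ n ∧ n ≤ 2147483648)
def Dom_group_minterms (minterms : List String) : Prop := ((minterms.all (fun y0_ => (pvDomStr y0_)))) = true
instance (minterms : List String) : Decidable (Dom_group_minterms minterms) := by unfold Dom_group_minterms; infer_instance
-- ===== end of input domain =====

-- B replaces the itertools.product-then-substitute-then-recount expansion by a structural
-- recursion threading the popcount as an accumulator (objective: alternative decomposition).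

-- ===== PORT A =====
-- positions = [i for i, char in enumerate(minterm) if char == '-']
def dashPositions : List Char → Nat → List Nat
  | [], _ => []
  | c :: cs, i => if c = '-' then i :: dashPositions cs (i + 1) else dashPositions cs (i + 1)

-- itertools.product("01", repeat=k): lexicographic, first coordinate most significant
def prod01 : Nat → List (List Char)
  | 0 => [[]]
  | k + 1 => (prod01 k).map (fun t => '0' :: t) ++ (prod01 k).map (fun t => '1' :: t)

-- for pos, value in zip(positions, values): expanded[pos] = value   (positions are valid indices)
def substitute (m : List Char) (ps : List Nat) (vs : List Char) : List Char :=
  (ps.zip vs).foldl (fun e pv => e.set pv.1 pv.2) m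

def expand_dont_cares (minterm : String) : List String :=
  let positions := dashPositions minterm.toList 0
  (prod01 positions.length).map (fun values => String.ofList (substitute minterm.toList positions values))

def group_minterms (minterms : List String) : List (Int × List String) :=
  (minterms.foldl (fun groups minterm =>
    (expand_dont_cares minterm).foldl (fun g expanded =>
      let count : Int := (PySem.Str.count expanded "1" : Int)
      let g' := if PySem.Dict.contains g count then g else PySem.Dict.insert g count []
      PySem.Dict.modify g' count [] (fun l => l ++ [expanded])) groups)
    (PySem.Dict.empty : PySem.Dict Int (List String))).items

-- ===== PORT B =====
-- _expand(s, ones): structural recursion, '0' branch before '1', popcount accumulated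
def expandAcc : List Char → Int → List (List Char × Int)
  | [], ones => [([], ones)]
  | c :: cs, ones =>
    if c = '-' then
      (expandAcc cs ones).map (fun p => ('0' :: p.1, p.2)) ++
      (expandAcc cs (ones + 1)).map (fun p => ('1' :: p.1, p.2))
    else
      (expandAcc cs (ones + (if c = '1' then 1 else 0))).map (fun p => (c :: p.1, p.2))

def group_minterms_alt (minterms : List String) : List (Int × List String) :=
  (minterms.foldl (fun groups minterm =>
    (expandAcc minterm.toList 0).foldl (fun g p =>
      PySem.Dict.modify (PySem.Dict.setdefault g p.2 []) p.2 [] (fun l => l ++ [String.ofList p.1])) groups)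
    (PySem.Dict.empty : PySem.Dict Int (List String))).items

-- ===== PRECONDITION & SPEC =====
def Spec_group_minterms (minterms : List String) (out : List (Int × List String)) : Prop := out = group_minterms_alt minterms
instance (minterms : List String) (out : List (Int × List String)) : Decidable (Spec_group_minterms minterms out) := by unfold Spec_group_minterms; infer_instance

-- ===== CLAIM (what is proved, stated in full; the proofs are below) =====
def Claim_equal_group_minterms : Prop := ∀ (minterms : List String), Dom_group_minterms minterms → Spec_group_minterms minterms (group_minterms minterms)

-- ===== LEMMAS AND PROOFS =====

-- PySem.Str.count with a single-character pattern is List.count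
theorem count_go_single (c : Char) : ∀ (l : List Char) (fuel acc : Nat), l.length ≤ fuel →
    PySem.Chars.count.go [c] fuel l acc = acc + l.count c
  | [], fuel, acc, _ => by cases fuel <;> simp [PySem.Chars.count.go]
  | d :: t, fuel + 1, acc, h => by
      have ht : t.length ≤ fuel := by simpa using h
      rw [PySem.Chars.count.go]
      by_cases hc : d = c
      · simp [List.isPrefixOf, hc, count_go_single c t fuel (acc + 1) ht]
        omega
      · simp [List.isPrefixOf, hc, Ne.symm hc, count_go_single c t fuel acc ht]

theorem count_single (cs : List Char) (c : Char) : PySem.Chars.count cs [c] = cs.count c := by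
  simp [PySem.Chars.count, count_go_single c cs cs.length 0 le_rfl]

-- the raw char-list expansion of A (before joining to strings)
def expCore (cs : List Char) : List (List Char) :=
  (prod01 (dashPositions cs 0).length).map (substitute cs (dashPositions cs 0))

theorem dashPositions_shift (cs : List Char) : ∀ i, dashPositions cs (i + 1) = (dashPositions cs i).map (· + 1) := by
  induction cs with
  | nil => intro i; simp [dashPositions]
  | cons c t ih => intro i; by_cases hc : c = '-' <;> simp [dashPositions, hc, ih]

theorem foldl_set_shift (l : List (Nat × Char)) : ∀ (c : Char) (e : List Char),
    (l.map (fun pv => (pv.1 + 1, pv.2))).foldl (fun e pv => e.set pv.1 pv.2) (c :: e)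
      = c :: l.foldl (fun e pv => e.set pv.1 pv.2) e := by
  induction l with
  | nil => intro c e; simp
  | cons p t ih => intro c e; simp [List.set, ih]

theorem zip_map_add_one : ∀ (ps : List Nat) (vs : List Char),
    (ps.map (· + 1)).zip vs = (ps.zip vs).map (fun pv => (pv.1 + 1, pv.2))
  | [], _ => by simp
  | _ :: _, [] => by simp
  | p :: ps, v :: vs => by simp [zip_map_add_one ps vs]

theorem substitute_cons (c : Char) (cs : List Char) (ps : List Nat) (vs : List Char) :
    substitute (c :: cs) (ps.map (· + 1)) vs = c :: substitute cs ps vs := by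
  unfold substitute
  rw [zip_map_add_one ps vs]
  exact foldl_set_shift (ps.zip vs) c cs

theorem substitute_dash (c v : Char) (cs vs : List Char) (ps : List Nat) :
    substitute (c :: cs) (0 :: ps.map (· + 1)) (v :: vs) = v :: substitute cs ps vs := by
  show substitute (v :: cs) (ps.map (· + 1)) vs = v :: substitute cs ps vs
  exact substitute_cons v cs ps vs

theorem expCore_cons_dash (cs : List Char) :
    expCore ('-' :: cs) = (expCore cs).map (fun t => '0' :: t) ++ (expCore cs).map (fun t => '1' :: t) := by
  have hp : dashPositions ('-' :: cs) 0 = 0 :: (dashPositions cs 0).map (· + 1) := by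
    rw [dashPositions]; simp [dashPositions_shift]
  unfold expCore
  rw [hp]
  rw [show prod01 (0 :: (dashPositions cs 0).map (· + 1)).length
        = (prod01 ((dashPositions cs 0).map (· + 1)).length).map (fun t => '0' :: t)
          ++ (prod01 ((dashPositions cs 0).map (· + 1)).length).map (fun t => '1' :: t) from rfl]
  simp only [List.length_map, List.map_append, List.map_map]
  congr 1 <;> exact List.map_congr_left (fun t _ => substitute_dash '-' _ cs t (dashPositions cs 0))

theorem expCore_cons_ndash (c : Char) (hc : c ≠ '-') (cs : List Char) :
    expCore (c :: cs) = (expCore cs).map (fun t => c :: t) := by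
  have hp : dashPositions (c :: cs) 0 = (dashPositions cs 0).map (· + 1) := by
    rw [dashPositions]; simp [hc, dashPositions_shift]
  unfold expCore
  rw [hp]
  simp only [List.length_map, List.map_map]
  exact List.map_congr_left (fun t _ => substitute_cons c cs (dashPositions cs 0) t)

theorem expandAcc_eq (cs : List Char) : ∀ ones : Int,
    expandAcc cs ones = (expCore cs).map (fun e => (e, ones + (e.count '1' : Int))) := by
  induction cs with
  | nil => intro ones; simp [expandAcc, expCore, dashPositions, prod01, substitute]
  | cons c t ih =>
    intro ones
    by_cases hc : c = '-'
    · subst hc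
      rw [expCore_cons_dash]
      rw [show expandAcc ('-' :: t) ones
            = (expandAcc t ones).map (fun p => ('0' :: p.1, p.2))
              ++ (expandAcc t (ones + 1)).map (fun p => ('1' :: p.1, p.2)) from by
            rw [expandAcc]; simp]
      simp only [ih, List.map_append, List.map_map]
      congr 1 <;>
        exact List.map_congr_left (fun e _ => by simp; ring)
    · rw [expCore_cons_ndash c hc]
      rw [show expandAcc (c :: t) ones
            = (expandAcc t (ones + (if c = '1' then 1 else 0))).map (fun p => (c :: p.1, p.2)) from by
            rw [expandAcc]; simp [hc]]
      simp only [ih, List.map_map]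
      refine List.map_congr_left (fun e _ => ?_)
      by_cases h1 : c = '1'
      · simp [h1]; ring
      · simp [h1]

-- A's per-expansion dict update equals B's, once the key is numed the same
theorem step_eq (g : PySem.Dict Int (List String)) (e : List Char) (k : Int)
    (hk : k = ((e.count '1' : Nat) : Int)) :
    (let count : Int := (PySem.Str.count (String.ofList e) "1" : Int)
     let g' := if PySem.Dict.contains g count then g else PySem.Dict.insert g count []
     PySem.Dict.modify g' count [] (fun l => l ++ [String.ofList e]))
      = PySem.Dict.modify (PySem.Dict.setdefault g k []) k [] (fun l => l ++ [String.ofList e]) := by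
  have hcnt : (PySem.Str.count (String.ofList e) "1" : Int) = k := by
    simp [hk, PySem.Str.count, count_single, String.toList_ofList]
  simp only [hcnt]
  by_cases h : PySem.Dict.contains g k
  · rw [PySem.Dict.setdefault_of_contains g [] h]
    simp [h]
  · simp only [Bool.not_eq_true] at h
    rw [PySem.Dict.setdefault_of_not_contains g [] h]
    simp [h]

theorem inner_fold_eq (m : String) (g : PySem.Dict Int (List String)) :
    (expand_dont_cares m).foldl (fun g expanded =>
      let count : Int := (PySem.Str.count expanded "1" : Int)
      let g' := if PySem.Dict.contains g count then g else PySem.Dict.insert g count []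
      PySem.Dict.modify g' count [] (fun l => l ++ [expanded])) g
    = (expandAcc m.toList 0).foldl (fun g p =>
      PySem.Dict.modify (PySem.Dict.setdefault g p.2 []) p.2 [] (fun l => l ++ [String.ofList p.1])) g := by
  have hA : expand_dont_cares m = (expCore m.toList).map String.ofList := by
    unfold expand_dont_cares expCore
    rw [List.map_map]
    rfl
  rw [hA, expandAcc_eq m.toList 0, List.foldl_map, List.foldl_map]
  induction expCore m.toList generalizing g with
  | nil => rfl
  | cons e t ih =>
      simp only [List.foldl_cons]
      rw [step_eq g e (0 + (e.count '1' : Int)) (by omega)]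
      exact ih _

theorem fold_eq (minterms : List String) : ∀ g : PySem.Dict Int (List String),
    minterms.foldl (fun groups minterm =>
      (expand_dont_cares minterm).foldl (fun g expanded =>
        let count : Int := (PySem.Str.count expanded "1" : Int)
        let g' := if PySem.Dict.contains g count then g else PySem.Dict.insert g count []
        PySem.Dict.modify g' count [] (fun l => l ++ [expanded])) groups) g
    = minterms.foldl (fun groups minterm =>
      (expandAcc minterm.toList 0).foldl (fun g p =>
        PySem.Dict.modify (PySem.Dict.setdefault g p.2 []) p.2 [] (fun l => l ++ [String.ofList p.1])) groups) g := by
  induction minterms with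
  | nil => intro g; rfl
  | cons m t ih => intro g; simp only [List.foldl_cons, inner_fold_eq m g, ih]

-- ===== VERDICT (by name: the statement is the Claim_ definition above) =====
theorem group_minterms_spec : Claim_equal_group_minterms := by
  intro minterms _
  unfold Spec_group_minterms group_minterms group_minterms_alt
  rw [fold_eq]
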